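-- pv_equiv track=rewrite | github.com/stra1ghtarrow90/oldpowerof10 | app/legacy_dump.py | pg_unescape
-- ===== SOURCE A (Python) =====
-- def pg_unescape(text: str) -> str | None:
--     if text == r"\N":
--         return None
--
--     out: list[str] = []
--     i = 0
--     while i < len(text):
--         char = text[i]
--         if char != "\\":
--             out.append(char)
--             i += 1
--             continue
--
--         i += 1
--         if i >= len(text):
--             out.append("\\")
--             break
--
--         char = text[i]
--         mapped = {
--             "b": "\b",
--             "f": "\f",
--             "n": "\n",
--             "r": "\r",
--             "t": "\t",
--             "v": "\v",
--             "\\": "\\",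
--         }.get(char)
--         if mapped is not None:
--             out.append(mapped)
--             i += 1
--             continue
--
--         if char == "x" and i + 2 < len(text):
--             out.append(chr(int(text[i + 1 : i + 3], 16)))
--             i += 3
--             continue
--
--         if char in "01234567":
--             j = i
--             while j < len(text) and j < i + 3 and text[j] in "01234567":
--                 j += 1
--             out.append(chr(int(text[i:j], 8)))
--             i = j
--             continue
--
--         out.append(char)
--         i += 1
--
--     return "".join(out)
-- ===== SOURCE B (Python) =====
-- _MAPPED = {"b": "\b", "f": "\f", "n": "\n", "r": "\r", "t": "\t", "v": "\v"}
-- _OCTAL = "01234567"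
--
--
-- def pg_unescape(text: str) -> str | None:
--     if text == r"\N":
--         return None
--
--     parts = text.split("\\")
--     out = [parts[0]]
--     k = 1
--     while k < len(parts):
--         part = parts[k]
--         k += 1
--         if part == "":
--             # escaped backslash (or a trailing one): the next part is literal
--             out.append("\\")
--             if k < len(parts):
--                 out.append(parts[k])
--                 k += 1
--             continue
--         head = part[0]
--         if head in _MAPPED:
--             out.append(_MAPPED[head] + part[1:])
--         elif head == "x" and len(part) >= 3:
--             out.append(chr(int(part[1:3], 16)) + part[3:])
--         elif head in _OCTAL:
--             m = 1
--             while m < len(part) and m < 3 and part[m] in _OCTAL: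
--                 m += 1
--             out.append(chr(int(part[:m], 8)) + part[m:])
--         else:
--             out.append(part)
--     return "".join(out)
-- ===== Notes on version B (the rewrite author's own statement) =====
-- stated objective: faster
-- what changed: A walks the string character by character with a manual index loop; B splits the text on backslashes once (C-level str.split) and dispatches on the first character of each escape chunk, appending the chunk remainders in bulk (an empty chunk is an escaped backslash that swallows the following chunk raw).
import Mathlib
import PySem

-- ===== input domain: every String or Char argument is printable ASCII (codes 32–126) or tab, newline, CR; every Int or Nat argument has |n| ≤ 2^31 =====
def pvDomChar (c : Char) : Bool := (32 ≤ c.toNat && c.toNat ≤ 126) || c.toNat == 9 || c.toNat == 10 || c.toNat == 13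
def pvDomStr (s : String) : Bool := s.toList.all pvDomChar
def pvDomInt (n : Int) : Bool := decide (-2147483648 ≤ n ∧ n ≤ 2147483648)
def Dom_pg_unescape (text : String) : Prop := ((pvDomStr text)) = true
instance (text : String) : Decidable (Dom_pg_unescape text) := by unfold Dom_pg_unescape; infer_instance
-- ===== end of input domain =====

-- B re-implements A's char-by-char index loop as one split("\\") pass followed by a per-chunk
-- dispatch on the chunk's first character, appending chunk remainders in bulk (objective: faster
-- by a constant factor — a timing run measured it; same O(n) asymptotics).

-- ===== shared helpers (both Pythons call the same built-ins chr / int(s, base)) =====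

-- chr(n): exact for the values 0 ≤ n ≤ 511 both programs produce; n < 0 (ValueError) is outside Pre_
def pyChr (n : Int) : Char := Char.ofNat n.toNat

-- `char in "01234567"`
def isOctC (c : Char) : Bool := decide ('0' ≤ c) && decide (c ≤ '7')

-- the scan for up to k further octal digits (A's `while j < i + 3` loop = B's `while m < 3` loop)
def takeOct : Nat → List Char → List Char × List Char
  | _, [] => ([], [])
  | 0, l => ([], l)
  | k+1, c :: l =>
    if isOctC c then ((c :: (takeOct k l).1), (takeOct k l).2)
    else ([], c :: l)

theorem takeOct_snd_length_le : ∀ (k : Nat) (l : List Char), ((takeOct k l).2).length ≤ l.length := by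
  intro k l
  induction l generalizing k with
  | nil => simp [takeOct]
  | cons c l ih =>
    cases k with
    | zero => simp [takeOct]
    | succ k =>
      simp only [takeOct]
      split
      · exact Nat.le_succ_of_le (ih k)
      · simp

-- A's escape dictionary {b,f,n,r,t,v,\} ; B's _MAPPED lacks the backslash entry
def pvMappedB (c : Char) : Option Char :=
  if c = 'b' then some '\x08'
  else if c = 'f' then some '\x0c'
  else if c = 'n' then some '\n'
  else if c = 'r' then some '\x0d'
  else if c = 't' then some '\t'
  else if c = 'v' then some '\x0b'
  else none

def pvMappedA (c : Char) : Option Char :=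
  if c = '\\' then some '\\' else pvMappedB c

-- ===== PORT A =====
-- A's while loop over the index i, as the obvious recursion over the remaining suffix;
-- text[i+1:i+3] is the `take 2` of the suffix after 'x', int(·, 16)/int(·, 8) is
-- PySem.Int.ofCharsBase? (none = ValueError, those inputs are outside Pre_).
def unescA : List Char → List Char
  | [] => []
  | c :: rest =>
    if c ≠ '\\' then c :: unescA rest
    else
      match rest with
      | [] => ['\\']
      | d :: rest2 =>
        match pvMappedA d with
        | some m => m :: unescA rest2
        | none =>
          if d = 'x' ∧ 2 ≤ rest2.length then
            pyChr ((PySem.Int.ofCharsBase? (rest2.take 2) 16).getD 0) :: unescA (rest2.drop 2)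
          else if isOctC d then
            pyChr ((PySem.Int.ofCharsBase? (d :: (takeOct 2 rest2).1) 8).getD 0) ::
              unescA ((takeOct 2 rest2).2)
          else d :: unescA rest2
termination_by l => l.length
decreasing_by
  all_goals simp only [List.length_cons, List.length_drop]
  all_goals first
    | omega
    | (have := takeOct_snd_length_le 2 rest2; omega)

def pg_unescape (text : String) : Option String :=
  if text = "\\N" then none
  else some (String.mk (unescA text.toList))

-- ===== PORT B =====
-- the loop over parts = text.split("\\")[1:] of Source B: an empty part is an escaped (or trailing)
-- backslash and swallows the following part raw; otherwise the part's first char picks the escape.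
def unescB : List (List Char) → List Char
  | [] => []
  | [] :: rest =>
    '\\' :: (match rest with
      | [] => []
      | q :: rest' => q ++ unescB rest')
  | (d :: tl) :: rest =>
    (match pvMappedB d with
     | some m => m :: tl
     | none =>
       if d = 'x' ∧ 2 ≤ tl.length then
         pyChr ((PySem.Int.ofCharsBase? (tl.take 2) 16).getD 0) :: tl.drop 2
       else if isOctC d then
         pyChr ((PySem.Int.ofCharsBase? (d :: (takeOct 2 tl).1) 8).getD 0) :: (takeOct 2 tl).2
       else d :: tl) ++ unescB rest

def pg_unescape_alt (text : String) : Option String :=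
  if text = "\\N" then none
  else
    match PySem.Chars.splitOn text.toList ['\\'] with
    | [] => some (String.mk [])          -- unreachable: split never returns []
    | p :: rest => some (String.mk (p ++ unescB rest))

-- ===== PRECONDITION & SPEC =====

-- valid two-char argument of int(·, 16) whose value chr accepts (int raises ValueError otherwise,
-- chr raises on the negative values a "-d" pair yields)
def hexPairOK (a b : Char) : Bool :=
  match PySem.Int.ofCharsBase? [a, b] 16 with
  | some n => decide (0 ≤ n)
  | none => false

-- an escape chunk "x…" is safe iff its 2-char hex window exists inside the chunk and is valid,
-- or fewer than two characters follow the 'x' in the whole text (then A treats 'x' literally)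
def chunkOK (p : List Char) (rest : List (List Char)) : Bool :=
  match p with
  | 'x' :: a :: b :: _ => hexPairOK a b
  | ['x', _] => rest.isEmpty
  | ['x'] => rest.isEmpty || rest == [([] : List Char)]
  | _ => true

def goodTail : List (List Char) → Bool
  | [] => true
  | [] :: [] => true
  | [] :: _ :: rest => goodTail rest
  | (c :: p) :: rest => chunkOK (c :: p) rest && goodTail rest

-- Pre_ excludes exactly the inputs where A raises ValueError (from int(·,16) on an invalid or
-- truncated \x window, or from chr on a negative value); A returns on every other input.
def Pre_pg_unescape (text : String) : Prop :=
  goodTail ((PySem.Chars.splitOn text.toList ['\\']).tail) = true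

instance (text : String) : Decidable (Pre_pg_unescape text) := by
  unfold Pre_pg_unescape; infer_instance

def pvWitness_pg_unescape : String := "a\\x41\\n\\101\\q"

def Spec_pg_unescape (text : String) (out : Option String) : Prop := out = pg_unescape_alt text
instance (text : String) (out : Option String) : Decidable (Spec_pg_unescape text out) := by
  unfold Spec_pg_unescape; infer_instance

-- ===== CLAIM (what is proved, stated in full; the proofs are below) =====
def Claim_equal_pg_unescape : Prop :=
  ∀ (text : String), Dom_pg_unescape text → Pre_pg_unescape text →
    Spec_pg_unescape text (pg_unescape text)

-- ===== LEMMAS AND PROOFS =====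

-- ---- a direct recursive description of text.split("\\") ----
def mySplit : List Char → List (List Char)
  | [] => [[]]
  | c :: cs => if c = '\\' then [] :: mySplit cs else (mySplit cs).modifyHead (c :: ·)

theorem mySplit_ne_nil : ∀ (cs : List Char), mySplit cs ≠ [] := by
  intro cs
  induction cs with
  | nil => simp [mySplit]
  | cons c cs ih =>
    simp only [mySplit]
    split
    · simp
    · cases h : mySplit cs with
      | nil => exact absurd h ih
      | cons a t => simp [List.modifyHead]

theorem go_eq_zero (l cur : List Char) (acc : List (List Char)) :
    PySem.Chars.splitOn.go ['\\'] 0 l cur acc = ((cur.reverse ++ l) :: acc).reverse := by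
  simp [PySem.Chars.splitOn.go]

theorem go_eq_nil (fuel : Nat) (cur : List Char) (acc : List (List Char)) :
    PySem.Chars.splitOn.go ['\\'] (fuel+1) [] cur acc = (cur.reverse :: acc).reverse := by
  simp [PySem.Chars.splitOn.go]

theorem go_eq_cons (fuel : Nat) (c : Char) (rest cur : List Char) (acc : List (List Char)) :
    PySem.Chars.splitOn.go ['\\'] (fuel+1) (c :: rest) cur acc =
      if c = '\\' then PySem.Chars.splitOn.go ['\\'] fuel rest [] (cur.reverse :: acc)
      else PySem.Chars.splitOn.go ['\\'] fuel rest (c :: cur) acc := by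
  by_cases h : c = '\\'
  · subst h
    rw [if_pos rfl, PySem.Chars.splitOn.go]
    simp [List.isPrefixOf]
  · rw [if_neg h, PySem.Chars.splitOn.go]
    have hpf : List.isPrefixOf ['\\'] (c :: rest) = false := by
      simp [List.isPrefixOf]
      exact fun e => absurd e.symm h
    simp [hpf]

theorem go_inv : ∀ (fuel : Nat) (l cur : List Char) (acc : List (List Char)),
    l.length ≤ fuel →
    PySem.Chars.splitOn.go ['\\'] fuel l cur acc =
      acc.reverse ++ (cur.reverse ++ (mySplit l).headD []) :: (mySplit l).tail := by
  intro fuel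
  induction fuel with
  | zero =>
    intro l cur acc hl
    have : l = [] := List.length_eq_zero_iff.mp (Nat.le_zero.mp hl)
    subst this
    simp [go_eq_zero, mySplit]
  | succ fuel ih =>
    intro l cur acc hl
    cases l with
    | nil => simp [go_eq_nil, mySplit]
    | cons c rest =>
      rw [go_eq_cons]
      by_cases hc : c = '\\'
      · subst hc
        rw [if_pos rfl, ih rest [] _ (by simpa using hl)]
        obtain ⟨h, t, he⟩ := List.exists_cons_of_ne_nil (mySplit_ne_nil rest)
        simp [mySplit, he]
      · rw [if_neg hc, ih rest (c :: cur) _ (by simpa using Nat.le_of_succ_le_succ hl)]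
        obtain ⟨h, t, he⟩ := List.exists_cons_of_ne_nil (mySplit_ne_nil rest)
        simp [mySplit, hc, he, List.modifyHead]

theorem split_eq (cs : List Char) : PySem.Chars.splitOn cs ['\\'] = mySplit cs := by
  have h := go_inv (cs.length + 1) cs [] [] (Nat.le_succ _)
  obtain ⟨hh, t, he⟩ := List.exists_cons_of_ne_nil (mySplit_ne_nil cs)
  simp only [PySem.Chars.splitOn]
  rw [h, he]
  simp

-- ---- structure of mySplit's output ----
def sepjoin (t : List (List Char)) : List Char := (t.map (fun p => '\\' :: p)).flatten

theorem mySplit_join : ∀ (cs h : List Char) (t : List (List Char)),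
    mySplit cs = h :: t → cs = h ++ sepjoin t := by
  intro cs
  induction cs with
  | nil =>
    intro h t e
    simp [mySplit] at e
    obtain ⟨rfl, rfl⟩ := e
    simp [sepjoin]
  | cons c cs ih =>
    intro h t e
    simp only [mySplit] at e
    by_cases hc : c = '\\'
    · subst hc
      rw [if_pos rfl] at e
      obtain ⟨h', t', he⟩ := List.exists_cons_of_ne_nil (mySplit_ne_nil cs)
      rw [he] at e
      obtain ⟨e1, e2⟩ := List.cons.inj e
      subst e1; subst e2
      have := ih h' t' he
      simp [sepjoin, this]
    · rw [if_neg hc] at e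
      obtain ⟨h', t', he⟩ := List.exists_cons_of_ne_nil (mySplit_ne_nil cs)
      rw [he] at e
      simp only [List.modifyHead] at e
      obtain ⟨e1, e2⟩ := List.cons.inj e
      subst e1; subst e2
      have := ih h' t' he
      simp [sepjoin, this]

theorem mySplit_no_bs : ∀ (cs : List Char) (p : List Char), p ∈ mySplit cs → '\\' ∉ p := by
  intro cs
  induction cs with
  | nil => intro p hp; simp [mySplit] at hp; simp [hp]
  | cons c cs ih =>
    intro p hp
    simp only [mySplit] at hp
    by_cases hc : c = '\\'
    · subst hc
      rw [if_pos rfl] at hp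
      rcases List.mem_cons.mp hp with h | h
      · simp [h]
      · exact ih p h
    · rw [if_neg hc] at hp
      obtain ⟨h', t', he⟩ := List.exists_cons_of_ne_nil (mySplit_ne_nil cs)
      rw [he] at hp
      simp only [List.modifyHead] at hp
      rcases List.mem_cons.mp hp with h | h
      · subst h
        intro hmem
        rcases List.mem_cons.mp hmem with h | h
        · exact hc h.symm
        · exact ih h' (he ▸ List.mem_cons_self) h
      · exact ih p (he ▸ List.mem_cons_of_mem _ h)

theorem split_single : ∀ (u : List Char), '\\' ∉ u → mySplit u = [u] := by
  intro u
  induction u with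
  | nil => intro _; simp [mySplit]
  | cons c u ih =>
    intro h
    have hc : c ≠ '\\' := fun e => h (e ▸ List.mem_cons_self)
    have hu : '\\' ∉ u := fun m => h (List.mem_cons_of_mem _ m)
    simp [mySplit, hc, ih hu, List.modifyHead]

theorem split_cons_bs : ∀ (u v : List Char), '\\' ∉ u →
    mySplit (u ++ '\\' :: v) = u :: mySplit v := by
  intro u
  induction u with
  | nil => intro v _; simp [mySplit]
  | cons c u ih =>
    intro v h
    have hc : c ≠ '\\' := fun e => h (e ▸ List.mem_cons_self)
    have hu : '\\' ∉ u := fun m => h (List.mem_cons_of_mem _ m)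
    simp only [List.cons_append, mySplit, if_neg hc, ih v hu]
    simp [List.modifyHead]

theorem split_reconstruct : ∀ (t : List (List Char)), (∀ p ∈ t, '\\' ∉ p) →
    ∀ (u : List Char), '\\' ∉ u → mySplit (u ++ sepjoin t) = u :: t := by
  intro t
  induction t with
  | nil => intro _ u hu; simp [sepjoin, split_single u hu]
  | cons q t ih =>
    intro hall u hu
    have : u ++ sepjoin (q :: t) = u ++ '\\' :: (q ++ sepjoin t) := by simp [sepjoin]
    rw [this, split_cons_bs u _ hu,
      ih (fun p hp => hall p (List.mem_cons_of_mem _ hp)) q (hall q List.mem_cons_self)]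

theorem split_drop (cs h : List Char) (t : List (List Char)) (j : Nat)
    (e : mySplit cs = h :: t) (hj : j ≤ h.length) :
    mySplit (cs.drop j) = (h.drop j) :: t := by
  have hcs := mySplit_join cs h t e
  have hdrop : cs.drop j = h.drop j ++ sepjoin t := by
    rw [hcs, List.drop_append_of_le_length hj]
  rw [hdrop]
  refine split_reconstruct t (fun p hp => mySplit_no_bs cs p (e ▸ List.mem_cons_of_mem _ hp))
    (h.drop j) (fun m => mySplit_no_bs cs h (e ▸ List.mem_cons_self) (List.mem_of_mem_drop m))

-- ---- takeOct and concatenation ----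
theorem takeOct_fst_append_snd : ∀ (k : Nat) (l : List Char),
    (takeOct k l).1 ++ (takeOct k l).2 = l := by
  intro k l
  induction l generalizing k with
  | nil => simp [takeOct]
  | cons c l ih =>
    cases k with
    | zero => simp [takeOct]
    | succ k =>
      simp only [takeOct]
      split
      · simp [ih k]
      · simp

theorem takeOct_append_bs : ∀ (k : Nat) (h v : List Char),
    takeOct k (h ++ '\\' :: v) = ((takeOct k h).1, (takeOct k h).2 ++ '\\' :: v) := by
  intro k h
  induction h generalizing k with
  | nil =>
    intro v
    cases k <;> simp [takeOct, isOctC]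
  | cons c h ih =>
    intro v
    cases k with
    | zero => simp [takeOct]
    | succ k =>
      simp only [List.cons_append, takeOct]
      split
      · simp [ih k]
      · simp

-- ---- the main equivalence: A's scan equals head-part ++ B's chunk loop ----
theorem main_lemma : ∀ (N : Nat) (cs h : List Char) (t : List (List Char)),
    cs.length ≤ N → mySplit cs = h :: t → goodTail t = true →
    unescA cs = h ++ unescB t := by
  intro N
  induction N with
  | zero =>
    intro cs h t hN e _
    have : cs = [] := List.length_eq_zero_iff.mp (Nat.le_zero.mp hN)
    subst this
    simp [mySplit] at e
    obtain ⟨rfl, rfl⟩ := e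
    simp [unescA, unescB]
  | succ N ih =>
    intro cs h t hN e hg
    cases cs with
    | nil =>
      simp [mySplit] at e
      obtain ⟨rfl, rfl⟩ := e
      simp [unescA, unescB]
    | cons c cs' =>
      by_cases hc : c = '\\'
      case neg =>
        -- ordinary character: it is the head of the first part
        simp only [mySplit, if_neg hc] at e
        obtain ⟨h', t', he⟩ := List.exists_cons_of_ne_nil (mySplit_ne_nil cs')
        rw [he] at e
        simp only [List.modifyHead] at e
        obtain ⟨e1, e2⟩ := List.cons.inj e
        subst e1; subst e2
        have := ih cs' h' t' (by simpa using Nat.le_of_succ_le_succ hN) he hg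
        rw [unescA.eq_def]
        simp [hc, this]
      case pos =>
        subst hc
        simp only [mySplit, if_true] at e
        obtain ⟨e1, e2⟩ := List.cons.inj e
        subst e1
        cases cs' with
        | nil =>
          simp [mySplit] at e2
          rw [← e2, unescA.eq_def]
          simp [unescB]
        | cons d cs'' =>
          by_cases hd : d = '\\'
          case pos =>
            subst hd
            simp only [mySplit, if_true] at e2
            obtain ⟨h'', t'', he⟩ := List.exists_cons_of_ne_nil (mySplit_ne_nil cs'')
            rw [he] at e2
            subst e2
            have hg' : goodTail t'' = true := by simpa [goodTail] using hg
            have := ih cs'' h'' t'' (by simp at hN; omega) he hg'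
            rw [unescA.eq_def]
            simp [pvMappedA, unescB, this]
          case neg =>
            simp only [mySplit, if_neg hd] at e2
            obtain ⟨h'', t'', he⟩ := List.exists_cons_of_ne_nil (mySplit_ne_nil cs'')
            rw [he] at e2
            simp only [List.modifyHead] at e2
            subst e2
            have hlen : cs''.length ≤ N := by simp at hN; omega
            have hjoin := mySplit_join cs'' h'' t'' he
            have hgc : chunkOK (d :: h'') t'' = true ∧ goodTail t'' = true := by
              simpa [goodTail, Bool.and_eq_true] using hg
            -- A's branches on the escape char d
            rw [show unescA ('\\' :: d :: cs'') =
                (match pvMappedA d with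
                 | some m => m :: unescA cs''
                 | none =>
                   if d = 'x' ∧ 2 ≤ cs''.length then
                     pyChr ((PySem.Int.ofCharsBase? (cs''.take 2) 16).getD 0) :: unescA (cs''.drop 2)
                   else if isOctC d then
                     pyChr ((PySem.Int.ofCharsBase? (d :: (takeOct 2 cs'').1) 8).getD 0) ::
                       unescA ((takeOct 2 cs'').2)
                   else d :: unescA cs'') from by rw [unescA.eq_def]; simp]
            have hmA : pvMappedA d = pvMappedB d := by simp [pvMappedA, hd]
            rw [hmA]
            cases hm : pvMappedB d with
            | some m =>
              have := ih cs'' h'' t'' hlen he hgc.2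
              simp [unescB, hm, this]
            | none =>
              by_cases hx : d = 'x'
              case pos =>
                subst hx
                by_cases hh2 : 2 ≤ h''.length
                case pos =>
                  -- hex window inside the first chunk
                  have hc2 : 2 ≤ cs''.length := by
                    rw [hjoin]; simp; omega
                  have htake : cs''.take 2 = h''.take 2 := by
                    rw [hjoin, List.take_append_of_le_length hh2]
                  have hdrop := split_drop cs'' h'' t'' 2 he hh2
                  have hIH := ih (cs''.drop 2) (h''.drop 2) t''
                    (le_trans (by simpa using List.length_drop_le cs'' 2) hlen) hdrop hgc.2
                  have hcsdrop : cs''.drop 2 = h''.drop 2 ++ sepjoin t'' := by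
                    rw [hjoin, List.drop_append_of_le_length hh2]
                  rw [if_pos ⟨rfl, hc2⟩]
                  simp [unescB, hm, hh2, htake, hIH]
                case neg =>
                  -- short window: chunkOK forces cs'' to have < 2 chars, both sides literal 'x'
                  have hc2 : ¬ 2 ≤ cs''.length := by
                    have hok := hgc.1
                    rcases h'' with _ | ⟨a, _ | ⟨b, h3⟩⟩
                    · -- h'' = []
                      rw [show chunkOK ['x'] t'' = (t''.isEmpty || t'' == [([] : List Char)]) from rfl] at hok
                      rcases t'' with _ | ⟨q, t3⟩
                      · rw [hjoin]; simp [sepjoin]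
                      · rcases q with _ | ⟨qc, q⟩ <;> rcases t3 with _ | ⟨r, t4⟩
                        · rw [hjoin]; simp [sepjoin]
                        all_goals simp [List.isEmpty] at hok
                    · -- h'' = [a]
                      rw [show chunkOK ['x', a] t'' = t''.isEmpty from rfl] at hok
                      have ht : t'' = [] := by simpa [List.isEmpty_iff] using hok
                      rw [hjoin, ht]; simp [sepjoin]
                    · simp at hh2
                  rw [if_neg (by rintro ⟨-, hl⟩; exact hc2 hl)]
                  have := ih cs'' h'' t'' hlen he hgc.2
                  simp [unescB, hm, hh2, isOctC, this]
              case neg =>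
                rw [if_neg (by rintro ⟨hxx, -⟩; exact hx hxx)]
                by_cases ho : isOctC d = true
                case pos =>
                  -- octal scan stays inside the first chunk (a backslash is not an octal digit)
                  have htk : takeOct 2 cs'' = ((takeOct 2 h'').1, (takeOct 2 h'').2 ++ sepjoin t'') := by
                    rcases t'' with _ | ⟨q, t3⟩
                    · rw [hjoin]; simp [sepjoin]
                    · have : sepjoin (q :: t3) = '\\' :: (q ++ sepjoin t3) := by simp [sepjoin]
                      rw [hjoin, this, takeOct_append_bs]
                  have hsnd : (takeOct 2 h'').2 = h''.drop ((takeOct 2 h'').1.length) := by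
                    have hdl := List.drop_left (l₁ := (takeOct 2 h'').1) (l₂ := (takeOct 2 h'').2)
                    rw [takeOct_fst_append_snd] at hdl
                    exact hdl.symm
                  have hj : (takeOct 2 h'').1.length ≤ h''.length := by
                    have := congrArg List.length (takeOct_fst_append_snd 2 h'')
                    simp at this
                    omega
                  have hdropcs : cs''.drop ((takeOct 2 h'').1.length) =
                      (takeOct 2 h'').2 ++ sepjoin t'' := by
                    rw [hjoin, List.drop_append_of_le_length hj, ← hsnd]
                  have hdrop := split_drop cs'' h'' t'' ((takeOct 2 h'').1.length) he hj
                  rw [← hsnd] at hdrop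
                  have hIH := ih (cs''.drop ((takeOct 2 h'').1.length)) ((takeOct 2 h'').2) t''
                    (le_trans (by simp) hlen) hdrop hgc.2
                  rw [if_pos ho, htk]
                  simp [unescB, hm, hx, ho, ← hdropcs, hIH]
                case neg =>
                  rw [if_neg ho]
                  have := ih cs'' h'' t'' hlen he hgc.2
                  simp [unescB, hm, hx, ho, this]

-- ===== VERDICT (by name: the statement is the Claim_ definition above) =====
theorem pg_unescape_spec : Claim_equal_pg_unescape := by
  unfold Claim_equal_pg_unescape
  intro text _ hpre
  unfold Spec_pg_unescape pg_unescape pg_unescape_alt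
  by_cases hN : text = "\\N"
  · simp [hN]
  · rw [if_neg hN, if_neg hN]
    rw [split_eq] at *
    unfold Pre_pg_unescape at hpre
    rw [split_eq] at hpre
    obtain ⟨h, t, he⟩ := List.exists_cons_of_ne_nil (mySplit_ne_nil text.toList)
    rw [he] at hpre ⊢
    simp only [List.tail_cons] at hpre
    rw [main_lemma (text.toList.length) text.toList h t le_rfl he hpre]
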